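-- pv_equiv track=rewrite | github.com/mz-mustafa/EEM | utilities.py | has_duplicate_values
-- ===== SOURCE A (Python) =====
-- def has_duplicate_values(var_list):
--     filtered_list = [item for item in var_list if item != -1]
--
--     seen = set()
--     for value in filtered_list:
--         if value in seen:
--             return True
--         seen.add(value)
--     return False
-- ===== SOURCE B (Python) =====
-- def has_duplicate_values(var_list):
--     s = sorted(item for item in var_list if item != -1)
--     return any(a == b for a, b in zip(s, s[1:]))
-- ===== Notes on version B (the rewrite author's own statement) =====
-- stated objective: alternative
-- what changed: Replaced A's hash-set early-exit membership loop by a sort-then-adjacent-scan: sort the filtered values and report a duplicate iff two consecutive sorted elements are equal (no set is maintained at all).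
import Mathlib
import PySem

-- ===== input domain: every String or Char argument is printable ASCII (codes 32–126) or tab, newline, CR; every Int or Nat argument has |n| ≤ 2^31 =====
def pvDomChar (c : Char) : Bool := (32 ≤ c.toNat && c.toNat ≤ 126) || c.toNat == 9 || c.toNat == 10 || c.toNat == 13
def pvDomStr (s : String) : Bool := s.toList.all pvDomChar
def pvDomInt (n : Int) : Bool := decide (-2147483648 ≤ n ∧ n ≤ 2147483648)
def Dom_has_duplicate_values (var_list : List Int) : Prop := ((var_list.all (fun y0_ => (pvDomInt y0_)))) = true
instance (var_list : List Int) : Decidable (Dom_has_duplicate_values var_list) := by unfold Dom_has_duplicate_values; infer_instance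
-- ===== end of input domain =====

-- B replaces A's hash-set early-exit loop by sort-then-adjacent-scan (alternative algorithm, no set maintained).

-- ===== PORT A =====
-- the 'for value in filtered_list' loop with its incremental 'seen' set and early return
def hdvLoop (seen : PySem.Set Int) : List Int → Bool
  | [] => false
  | value :: rest =>
      if PySem.Set.contains seen value then true
      else hdvLoop (PySem.Set.add seen value) rest

def has_duplicate_values (var_list : List Int) : Bool :=
  hdvLoop PySem.Set.empty (var_list.filter (fun item => item != -1))

-- ===== PORT B =====
-- any(a == b for a, b in zip(s, s[1:])) : scan adjacent pairs of the sorted list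
def hdvAdjDup : List Int → Bool
  | a :: b :: r => a == b || hdvAdjDup (b :: r)
  | _ => false

def has_duplicate_values_alt (var_list : List Int) : Bool :=
  hdvAdjDup (PySem.List.sorted (var_list.filter (fun item => item != -1)) (fun x => x) false)

-- ===== PRECONDITION & SPEC =====
def Spec_has_duplicate_values (var_list : List Int) (out : Bool) : Prop := out = has_duplicate_values_alt var_list
instance (var_list : List Int) (out : Bool) : Decidable (Spec_has_duplicate_values var_list out) := by unfold Spec_has_duplicate_values; infer_instance

-- ===== CLAIM =====
def Claim_equal_has_duplicate_values : Prop := ∀ (var_list : List Int), Dom_has_duplicate_values var_list → Spec_has_duplicate_values var_list (has_duplicate_values var_list)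

-- ===== LEMMAS AND PROOFS =====

-- A's loop returns false iff the remaining list is duplicate-free and disjoint from 'seen'
theorem hdvLoop_eq_false_iff (l : List Int) : ∀ (s : PySem.Set Int),
    hdvLoop s l = false ↔ (l.Nodup ∧ ∀ x ∈ l, x ∉ s) := by
  induction l with
  | nil => intro s; simp [hdvLoop]
  | cons v rest ih =>
    intro s
    by_cases hv : v ∈ s
    · simp only [hdvLoop, PySem.Set.contains]
      rw [if_pos (by simpa using hv)]
      simp only [Bool.true_eq_false, false_iff]
      rintro ⟨_, hd⟩
      exact hd v (List.mem_cons_self) hv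
    · simp only [hdvLoop, PySem.Set.contains]
      rw [if_neg (by simpa using hv)]
      rw [ih]
      constructor
      · rintro ⟨hn, hd⟩
        refine ⟨List.nodup_cons.mpr ⟨fun hm => hd v hm ((PySem.Set.mem_add s v v).mpr (Or.inr rfl)), hn⟩, ?_⟩
        intro x hx
        rcases List.mem_cons.mp hx with rfl | hx
        · exact hv
        · intro hxs
          exact hd x hx ((PySem.Set.mem_add s v x).mpr (Or.inl hxs))
      · rintro ⟨hn, hd⟩
        rcases List.nodup_cons.mp hn with ⟨hvr, hnr⟩
        refine ⟨hnr, fun x hx hxs => ?_⟩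
        rcases (PySem.Set.mem_add s v x).mp hxs with h | h
        · exact hd x (List.mem_cons_of_mem v hx) h
        · exact hvr (h ▸ hx)

-- on a ≤-sorted list, an adjacent equal pair exists iff the list has a duplicate
theorem hdvAdjDup_false_iff (l : List Int) (hs : l.Pairwise (· ≤ ·)) :
    hdvAdjDup l = false ↔ l.Nodup := by
  induction l with
  | nil => simp [hdvAdjDup]
  | cons a t ih =>
    cases t with
    | nil => simp [hdvAdjDup]
    | cons b r =>
      rcases List.pairwise_cons.mp hs with ⟨hab, hrest⟩
      have hab' : a ≤ b := hab b List.mem_cons_self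
      simp only [hdvAdjDup, Bool.or_eq_false_iff, beq_eq_false_iff_ne]
      rw [ih hrest]
      constructor
      · rintro ⟨hne, hnd⟩
        refine List.nodup_cons.mpr ⟨?_, hnd⟩
        intro hmem
        rcases List.mem_cons.mp hmem with rfl | hmem
        · exact hne rfl
        · have hb_le : b ≤ a := (List.pairwise_cons.mp hrest).1 a hmem
          exact hne (le_antisymm hab' hb_le)
      · intro hnd
        rcases List.nodup_cons.mp hnd with ⟨hna, hnd'⟩
        exact ⟨fun h => hna (h ▸ List.mem_cons_self), hnd'⟩

-- ===== VERDICT =====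
theorem has_duplicate_values_spec : Claim_equal_has_duplicate_values := by
  intro var_list _
  unfold Spec_has_duplicate_values has_duplicate_values has_duplicate_values_alt
  set f := var_list.filter (fun item => item != -1) with hf
  set g := PySem.List.sorted f (fun x => x) false with hg
  have hperm : g.Perm f := PySem.List.sorted_perm f (fun x => x) false
  have hpair : g.Pairwise (· ≤ ·) := by
    have := PySem.List.sorted_pairwise f (fun x => x)
    simpa using this
  have hA := hdvLoop_eq_false_iff f PySem.Set.empty
  have hB := hdvAdjDup_false_iff g hpair
  have hnotin : (∀ x ∈ f, x ∉ PySem.Set.empty) := by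
    intro x _ hx
    simp [PySem.Set.empty] at hx
  by_cases hnd : f.Nodup
  · have ha : hdvLoop PySem.Set.empty f = false := hA.mpr ⟨hnd, hnotin⟩
    have hb : hdvAdjDup g = false := hB.mpr (hperm.nodup_iff.mpr hnd)
    rw [ha, hb]
  · have ha : hdvLoop PySem.Set.empty f = true := by
      cases h : hdvLoop PySem.Set.empty f
      · exact absurd ((hA.mp h).1) hnd
      · rfl
    have hb : hdvAdjDup g = true := by
      cases h : hdvAdjDup g
      · exact absurd (hperm.nodup_iff.mp (hB.mp h)) hnd
      · rfl
    rw [ha, hb]
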